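-- pv_equiv track=rewrite | github.com/EllisGamingTv/Dying-Light-Save-Editor-GUI | src/logic/cheats.py | get_duplicate_id_map
-- ===== SOURCE A (Python) =====
-- def get_duplicate_id_map(items):
--     id_map = {}
--
--     for item in items:
--         item_id = item.get("id")
--         if not item_id:
--             continue
--
--         id_map.setdefault(item_id, []).append(item)
--
--     return {k: v for k, v in id_map.items() if len(v) > 1}
-- ===== SOURCE B (Python) =====
-- def get_duplicate_id_map(items):
--     def iid(item):
--         return item.get("id") or ""
--
--     ids = []
--     for item in items:
--         v = iid(item)
--         if v != "" and v not in ids: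
--             ids.append(v)
--
--     result = {}
--     for v in ids:
--         group = [item for item in items if iid(item) == v]
--         if len(group) > 1:
--             result[v] = group
--     return result
-- ===== Notes on version B (the rewrite author's own statement) =====
-- stated objective: alternative
-- what changed: Replaces A's single-pass dict grouping plus comprehension filter by a distinct-ids-first nested-scan scheme: collect the first-seen distinct non-falsy ids, then for each such id re-scan the item list to build its group, keeping only groups of size > 1; no dict of lists is incrementally built.
import Mathlib
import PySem

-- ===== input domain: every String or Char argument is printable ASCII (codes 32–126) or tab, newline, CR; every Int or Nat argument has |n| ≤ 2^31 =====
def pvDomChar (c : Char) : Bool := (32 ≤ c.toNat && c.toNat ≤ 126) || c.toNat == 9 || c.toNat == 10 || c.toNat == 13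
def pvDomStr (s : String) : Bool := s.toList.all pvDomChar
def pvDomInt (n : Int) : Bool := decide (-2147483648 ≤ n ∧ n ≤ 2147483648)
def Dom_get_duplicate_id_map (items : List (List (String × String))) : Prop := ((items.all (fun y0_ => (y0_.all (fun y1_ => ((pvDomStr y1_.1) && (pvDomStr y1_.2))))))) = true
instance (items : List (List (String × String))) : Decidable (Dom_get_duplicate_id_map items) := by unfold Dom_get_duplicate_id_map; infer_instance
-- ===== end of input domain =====

-- B replaces A's single-pass dict grouping + comprehension filter by a distinct-ids-first
-- nested-scan scheme (collect first-seen nonempty ids, then re-scan per id, keep groups > 1);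
-- a genuinely different algorithm of similar size, no speed claim.


-- ===== PORT A =====
-- 'item_id = item.get("id"); if not item_id: continue' (none = skipped: missing key or falsy "")
def pvId? (item : List (String × String)) : Option String :=
  match (PySem.Dict.ofList item).get? "id" with
  | some s => if s == "" then none else some s
  | none => none

def get_duplicate_id_map (items : List (List (String × String))) : List (String × List (List (String × String))) :=
  -- for item in items: id_map.setdefault(item_id, []).append(item)
  let id_map : PySem.Dict String (List (List (String × String))) :=
    items.foldl (fun d item =>
      match pvId? item with
      | none => d
      | some s => d.modify s [] (fun v => v ++ [item])) PySem.Dict.empty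
  -- {k: v for k, v in id_map.items() if len(v) > 1}
  id_map.items.filter (fun p => decide (1 < p.2.length))

-- ===== PORT B =====
-- def iid(item): return item.get("id") or ""
def pvIid (item : List (String × String)) : String := (PySem.Dict.ofList item).getD "id" ""

def get_duplicate_id_map_alt (items : List (List (String × String))) : List (String × List (List (String × String))) :=
  -- pass 1: first-seen distinct non-falsy ids
  let ids : List String := items.foldl (fun acc item =>
    let v := pvIid item
    if v ≠ "" ∧ v ∉ acc then acc ++ [v] else acc) []
  -- pass 2: for v in ids: group = [item for item in items if iid(item) == v]; keep if len > 1
  ids.filterMap (fun v =>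
    let group := items.filter (fun item => pvIid item == v)
    if 1 < group.length then some (v, group) else none)

-- ===== PRECONDITION & SPEC =====
def Spec_get_duplicate_id_map (items : List (List (String × String))) (out : List (String × List (List (String × String)))) : Prop := out = get_duplicate_id_map_alt items
instance (items : List (List (String × String))) (out : List (String × List (List (String × String)))) : Decidable (Spec_get_duplicate_id_map items out) := by unfold Spec_get_duplicate_id_map; infer_instance

-- ===== CLAIM (what is proved, stated in full; the proofs are below) =====
def Claim_equal_get_duplicate_id_map : Prop := ∀ (items : List (List (String × String))), Dom_get_duplicate_id_map items → Spec_get_duplicate_id_map items (get_duplicate_id_map items)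

-- ===== LEMMAS AND PROOFS =====

-- the two skip tests agree: pvId? is 'some' exactly on the nonempty pvIid
theorem pvId?_eq (item : List (String × String)) :
    pvId? item = if pvIid item = "" then none else some (pvIid item) := by
  unfold pvId? pvIid
  cases h : (PySem.Dict.ofList item).get? "id" with
  | none => simp [PySem.Dict.getD_eq_get?_getD, h]
  | some s =>
    simp only [PySem.Dict.getD_eq_get?_getD, h, Option.getD_some]
    by_cases hs : s = "" <;> simp [hs]

theorem pvId?_some_ne (item : List (String × String)) (s : String)
    (h : pvId? item = some s) : s ≠ "" := by
  rw [pvId?_eq] at h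
  by_cases hv : pvIid item = ""
  · simp [hv] at h
  · rw [if_neg hv, Option.some.injEq] at h
    rw [← h]; exact hv

theorem pvId?_some_iid (item : List (String × String)) (s : String)
    (h : pvId? item = some s) : pvIid item = s := by
  rw [pvId?_eq] at h
  by_cases hv : pvIid item = ""
  · simp [hv] at h
  · rw [if_neg hv, Option.some.injEq] at h; exact h

-- the keyed items A's loop actually processes: (id, item) for the non-skipped items
def pvKeyed (items : List (List (String × String))) : List (String × List (String × String)) :=
  items.filterMap (fun it => (pvId? it).map (fun s => (s, it)))

theorem pvKeyed_cons (it : List (String × String)) (rest : List (List (String × String))) :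
    pvKeyed (it :: rest) = (match pvId? it with
      | none => pvKeyed rest
      | some s => (s, it) :: pvKeyed rest) := by
  simp only [pvKeyed, List.filterMap_cons]
  cases pvId? it <;> rfl

theorem pvFold_keyed {σ : Type} (items : List (List (String × String)))
    (f : σ → String × List (String × String) → σ) (init : σ) :
    items.foldl (fun d item =>
      match pvId? item with
      | none => d
      | some s => f d (s, item)) init = (pvKeyed items).foldl f init := by
  induction items generalizing init with
  | nil => rfl
  | cons it rest ih =>
    simp only [List.foldl_cons, pvKeyed, List.filterMap_cons]
    cases h : pvId? it with
    | none => simpa [pvKeyed] using ih _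
    | some s => simpa [pvKeyed] using ih _

-- the grouping fold of A
def pvGroup (l : List (String × List (String × String))) :
    PySem.Dict String (List (List (String × String))) :=
  l.foldl (fun d p => d.modify p.1 [] (fun v => v ++ [p.2])) PySem.Dict.empty

theorem pvGroup_keys (l : List (String × List (String × String))) :
    (pvGroup l).keys = PySem.Set.ofList (l.map Prod.fst) := by
  simpa [PySem.Set.update_empty] using
    PySem.Dict.keys_foldl_modify_key l Prod.fst ([] : List (List (String × String)))
      (fun _ p v => v ++ [p.2]) PySem.Dict.empty

theorem pvGroup_nodup (l : List (String × List (String × String))) :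
    (pvGroup l).keys.Nodup := by
  rw [pvGroup_keys]; exact PySem.Set.nodup_ofList _

theorem pvGroup_getD (l : List (String × List (String × String))) (k : String) :
    (pvGroup l).getD k [] = (l.filter (fun p => p.1 == k)).map (·.2) := by
  simpa using PySem.Dict.getD_foldl_modify_append l PySem.Dict.empty k

theorem pvGroup_items (l : List (String × List (String × String))) :
    (pvGroup l).items = (PySem.Set.ofList (l.map Prod.fst)).map
      (fun k => (k, (l.filter (fun p => p.1 == k)).map (·.2))) := by
  rw [PySem.Dict.items_eq_map_keys (pvGroup l) (pvGroup_nodup l) [], pvGroup_keys]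
  exact List.map_congr_left (fun k _ => by rw [pvGroup_getD])

-- B's first pass builds exactly the set of ids of the keyed items (first occurrences in order)
theorem pvIds_eq (items : List (List (String × String))) :
    items.foldl (fun acc item =>
        if pvIid item ≠ "" ∧ pvIid item ∉ acc then acc ++ [pvIid item] else acc) []
      = PySem.Set.ofList ((pvKeyed items).map Prod.fst) := by
  have hstep : (fun (acc : List String) item =>
        if pvIid item ≠ "" ∧ pvIid item ∉ acc then acc ++ [pvIid item] else acc)
      = (fun acc item =>
        match pvId? item with
        | none => acc
        | some s => PySem.Set.add acc s) := by
    funext acc item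
    rw [pvId?_eq]
    by_cases hv : pvIid item = ""
    · simp [hv]
    · rw [if_neg hv]
      show (if pvIid item ≠ "" ∧ pvIid item ∉ acc then acc ++ [pvIid item] else acc)
        = PySem.Set.add acc (pvIid item)
      rw [PySem.Set.add_eq_ite]
      by_cases hm : pvIid item ∈ acc <;> simp [hv, hm]
  rw [hstep, pvFold_keyed items (fun acc p => PySem.Set.add acc p.1) [],
    PySem.Set.ofList_eq_foldl, List.foldl_map]

theorem pvMem_ids_ne (items : List (List (String × String))) (v : String)
    (h : v ∈ (pvKeyed items).map Prod.fst) : v ≠ "" := by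
  rcases List.mem_map.1 h with ⟨p, hp, hv⟩
  rcases List.mem_filterMap.1 hp with ⟨it, _, hit⟩
  rcases Option.map_eq_some_iff.1 hit with ⟨s, hs, hpair⟩
  have := pvId?_some_ne it s hs
  rw [← hv, ← hpair]; exact this

-- B's inner scan over items equals A's group of the keyed items, for a nonempty id
theorem pvGroupB_eq (items : List (List (String × String))) (v : String) (hv : v ≠ "") :
    items.filter (fun item => pvIid item == v)
      = ((pvKeyed items).filter (fun p => p.1 == v)).map (·.2) := by
  induction items with
  | nil => rfl
  | cons it rest ih =>
    rw [List.filter_cons, pvKeyed_cons]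
    cases h : pvId? it with
    | none =>
      have h0 : pvIid it = "" := by
        rw [pvId?_eq] at h
        by_cases hv0 : pvIid it = ""
        · exact hv0
        · rw [if_neg hv0] at h; cases h
      have hf : (pvIid it == v) = false := beq_eq_false_iff_ne.2 (by rw [h0]; exact Ne.symm hv)
      rw [hf]
      simpa using ih
    | some s =>
      have hs : pvIid it = s := pvId?_some_iid it s h
      rw [List.filter_cons]
      by_cases he : s = v
      · have h1 : (pvIid it == v) = true := by rw [hs, he]; simp
        have h2 : (((s, it) : String × List (String × String)).1 == v) = true := by
          simpa using he
        rw [h1, h2]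
        simp only [if_true, List.map_cons]
        rw [ih]
      · have h1 : (pvIid it == v) = false := by rw [hs]; exact beq_eq_false_iff_ne.2 he
        have h2 : (((s, it) : String × List (String × String)).1 == v) = false :=
          beq_eq_false_iff_ne.2 he
        rw [h1, h2]
        simp only [Bool.false_eq_true, if_false]
        exact ih

-- a filterMap of an 'if … then some … else none' is a filter-then-map
theorem pvFilterMap_if {α β : Type} (l : List α) (p : α → Prop) [DecidablePred p] (f : α → β) :
    l.filterMap (fun x => if p x then some (f x) else none)
      = (l.filter (fun x => decide (p x))).map f := by
  induction l with
  | nil => rfl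
  | cons x xs ih =>
    by_cases h : p x <;> simp [h, ih]

-- ===== VERDICT (by name: the statement is the Claim_ definition above) =====
theorem get_duplicate_id_map_spec : Claim_equal_get_duplicate_id_map := by
  intro items _
  unfold Spec_get_duplicate_id_map get_duplicate_id_map get_duplicate_id_map_alt
  dsimp only
  have hfold := pvFold_keyed items (fun d p => d.modify p.1 [] (fun v => v ++ [p.2]))
    (PySem.Dict.empty : PySem.Dict String (List (List (String × String))))
  rw [hfold, pvIds_eq items]
  set l := pvKeyed items with hl
  set L := l.map Prod.fst with hL
  -- A's side: grouped items filtered by group length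
  have hA : (pvGroup l).items.filter (fun p => decide (1 < p.2.length))
      = ((PySem.Set.ofList L).filter
            (fun k => decide (1 < ((l.filter (fun p => p.1 == k)).map (·.2)).length))).map
          (fun k => (k, (l.filter (fun p => p.1 == k)).map (·.2))) := by
    rw [pvGroup_items, List.filter_map]
    rfl
  have hg : (List.foldl (fun d p => d.modify p.1 [] (fun v => v ++ [p.2]))
      PySem.Dict.empty l : PySem.Dict String (List (List (String × String)))) = pvGroup l := rfl
  rw [hg, hA]
  -- B's side: filterMap over the id set
  rw [pvFilterMap_if (PySem.Set.ofList L)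
      (fun v => 1 < (items.filter (fun item => pvIid item == v)).length)
      (fun v => (v, items.filter (fun item => pvIid item == v)))]
  have hfil : ((PySem.Set.ofList L).filter
        (fun k => decide (1 < ((l.filter (fun p => p.1 == k)).map (·.2)).length)))
      = ((PySem.Set.ofList L).filter
        (fun v => decide (1 < (items.filter (fun item => pvIid item == v)).length))) := by
    apply List.filter_congr
    intro k hk
    have hk' : k ∈ L := (PySem.Set.mem_ofList _ _).1 hk
    rw [pvGroupB_eq items k (pvMem_ids_ne items k hk')]
  rw [hfil]
  apply List.map_congr_left
  intro k hk
  have hk' : k ∈ L := (PySem.Set.mem_ofList _ _).1 (List.mem_filter.1 hk).1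
  rw [pvGroupB_eq items k (pvMem_ids_ne items k hk')]
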